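-- pv_equiv track=rewrite | github.com/trioskosmos/rabuka_reloaded | root_files/live_game_tester.py | select_action_for_prediction
-- ===== SOURCE A (Python) =====
-- def select_action_for_prediction(actions, state):
--     """Select an action for prediction testing"""
--     # Prefer play_member_to_stage actions for testing
--     for i, action in enumerate(actions):
--         if 'play_member_to_stage' in action.get('action_type', ''):
--             return i, action
--
--     # Fall back to pass actions
--     for i, action in enumerate(actions):
--         if 'pass' in action.get('action_type', ''):
--             return i, action
--
--     return None, None
-- ===== SOURCE B (Python) =====
-- def select_action_for_prediction(actions, state):
--     """Select an action for prediction testing (single pass with held-over pass fallback)"""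
--     fallback = None
--     for i, action in enumerate(actions):
--         t = action.get('action_type', '')
--         if 'play_member_to_stage' in t:
--             return i, action
--         if fallback is None and 'pass' in t:
--             fallback = (i, action)
--     if fallback is not None:
--         return fallback
--     return None, None
-- ===== Notes on version B (the rewrite author's own statement) =====
-- stated objective: alternative
-- what changed: Replaced the two sequential scans (play first, then pass) by a single enumerate loop that returns immediately on a play match and remembers the first pass match as a fallback returned after the loop.
import Mathlib
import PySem

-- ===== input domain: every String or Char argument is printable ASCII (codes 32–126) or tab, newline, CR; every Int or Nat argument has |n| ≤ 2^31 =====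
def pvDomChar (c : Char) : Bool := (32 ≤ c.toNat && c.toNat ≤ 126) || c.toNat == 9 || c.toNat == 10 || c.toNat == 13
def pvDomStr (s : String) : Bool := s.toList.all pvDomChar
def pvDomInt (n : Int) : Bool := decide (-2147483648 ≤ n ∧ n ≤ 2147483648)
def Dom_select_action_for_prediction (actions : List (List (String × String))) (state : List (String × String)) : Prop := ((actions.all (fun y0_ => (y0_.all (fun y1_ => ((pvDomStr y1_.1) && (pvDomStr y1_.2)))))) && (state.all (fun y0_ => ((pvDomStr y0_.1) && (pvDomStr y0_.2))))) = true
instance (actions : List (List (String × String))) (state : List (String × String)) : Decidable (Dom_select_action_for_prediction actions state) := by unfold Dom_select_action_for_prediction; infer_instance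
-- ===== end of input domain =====

-- B differs from A by using ONE enumerate loop that returns immediately on a 'play_member_to_stage'
-- match and remembers the first 'pass' match as a fallback returned after the loop (alternative decomposition).

-- ===== PORT A =====
-- first loop: return the first (i, action) whose action_type contains 'play_member_to_stage'
def pvA_play : List (List (String × String)) → Int → Option (Int × List (String × String))
  | [], _ => none
  | a :: rest, i =>
    if PySem.Str.isIn "play_member_to_stage" (PySem.Dict.getD (PySem.Dict.ofList a) "action_type" "") then some (i, a)
    else pvA_play rest (i + 1)

-- second loop: return the first (i, action) whose action_type contains 'pass'
def pvA_pass : List (List (String × String)) → Int → Option (Int × List (String × String))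
  | [], _ => none
  | a :: rest, i =>
    if PySem.Str.isIn "pass" (PySem.Dict.getD (PySem.Dict.ofList a) "action_type" "") then some (i, a)
    else pvA_pass rest (i + 1)

def select_action_for_prediction (actions : List (List (String × String))) (state : List (String × String)) : Option Int × (Option (List (String × String))) :=
  match pvA_play actions 0 with
  | some p => (some p.1, some p.2)
  | none =>
    match pvA_pass actions 0 with
    | some p => (some p.1, some p.2)
    | none => (none, none)

-- ===== PORT B =====
-- single pass: immediate return on a play match, first pass match held in `fb`
def pvB_loop : List (List (String × String)) → Int → Option (Int × List (String × String)) → Option Int × (Option (List (String × String)))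
  | [], _, fb =>
    match fb with
    | some p => (some p.1, some p.2)
    | none => (none, none)
  | a :: rest, i, fb =>
    let t := PySem.Dict.getD (PySem.Dict.ofList a) "action_type" ""
    if PySem.Str.isIn "play_member_to_stage" t then (some i, some a)
    else pvB_loop rest (i + 1) (if fb.isNone && PySem.Str.isIn "pass" t then some (i, a) else fb)

def select_action_for_prediction_alt (actions : List (List (String × String))) (state : List (String × String)) : Option Int × (Option (List (String × String))) :=
  pvB_loop actions 0 none

-- ===== PRECONDITION & SPEC =====
def Spec_select_action_for_prediction (actions : List (List (String × String))) (state : List (String × String)) (out : Option Int × (Option (List (String × String)))) : Prop := out = select_action_for_prediction_alt actions state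
instance (actions : List (List (String × String))) (state : List (String × String)) (out : Option Int × (Option (List (String × String)))) : Decidable (Spec_select_action_for_prediction actions state out) := by unfold Spec_select_action_for_prediction; infer_instance

-- ===== CLAIM (what is proved, stated in full; the proofs are below) =====
def Claim_equal_select_action_for_prediction : Prop := ∀ (actions : List (List (String × String))) (state : List (String × String)), Dom_select_action_for_prediction actions state → Spec_select_action_for_prediction actions state (select_action_for_prediction actions state)

-- ===== LEMMAS AND PROOFS =====
-- characterisation of B's loop in terms of A's two loops
theorem pvB_loop_eq (actions : List (List (String × String))) :
    ∀ (i : Int) (fb : Option (Int × List (String × String))),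
    pvB_loop actions i fb =
      match pvA_play actions i with
      | some p => (some p.1, some p.2)
      | none =>
        match fb with
        | some p => (some p.1, some p.2)
        | none =>
          match pvA_pass actions i with
          | some p => (some p.1, some p.2)
          | none => (none, none) := by
  induction actions with
  | nil => intro i fb; rfl
  | cons a rest ih =>
    intro i fb
    simp only [pvB_loop, pvA_play, pvA_pass]
    by_cases hplay : PySem.Str.isIn "play_member_to_stage" (PySem.Dict.getD (PySem.Dict.ofList a) "action_type" "") = true
    · rw [if_pos hplay, if_pos hplay]
    · rw [if_neg hplay, if_neg hplay, ih]
      cases fb with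
      | some p => simp
      | none =>
        by_cases hpass : PySem.Str.isIn "pass" (PySem.Dict.getD (PySem.Dict.ofList a) "action_type" "") = true
        · rw [if_pos hpass]
          have h2 : PySem.Chars.isIn ['p','a','s','s'] ((PySem.Dict.ofList a).getD "action_type" "").toList = true := by
            simpa [PySem.Str.isIn_eq] using hpass
          simp [h2]
        · rw [if_neg hpass]
          have h2 : PySem.Chars.isIn ['p','a','s','s'] ((PySem.Dict.ofList a).getD "action_type" "").toList = false := by
            simpa [PySem.Str.isIn_eq] using hpass
          simp [h2]

-- ===== VERDICT (by name: the statement is the Claim_ definition above) =====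
theorem select_action_for_prediction_spec : Claim_equal_select_action_for_prediction := by
  intro actions state _
  unfold Spec_select_action_for_prediction select_action_for_prediction select_action_for_prediction_alt
  rw [pvB_loop_eq]
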